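-- pv_equiv track=rewrite | github.com/landaire/unrealin | flag_checker.py | analyze_flags
-- ===== SOURCE A (Python) =====
-- flags_dict = {
--     0x00000001: "RF_Transactional",
--     0x00000002: "RF_Unreachable",
--     0x00000004: "RF_Public",
--     0x00000008: "RF_TagImp",
--     0x00000010: "RF_TagExp",
--     0x00000020: "RF_SourceModified",
--     0x00000040: "RF_TagGarbage",
--     0x00000080: "RF_Final",
--     0x00000100: "RF_PerObjectLocalized",
--     0x00000200: "RF_NeedLoad",
--     0x00000400: "RF_HighlightedName/RF_EliminateObject/RF_RemappedName/RF_Protected",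
--     0x00000800: "RF_InSingularFunc/RF_Suppress/RF_StateChanged",
--     0x00001000: "RF_InEndState",
--     0x00002000: "RF_Transient",
--     0x00004000: "RF_Preloading",
--     0x00008000: "RF_LoadForClient",
--     0x00010000: "RF_LoadForServer",
--     0x00020000: "RF_LoadForEdit",
--     0x00040000: "RF_Standalone",
--     0x00080000: "RF_NotForClient",
--     0x00100000: "RF_NotForServer",
--     0x00200000: "RF_NotForEdit",
--     0x00400000: "RF_Destroyed",
--     0x00800000: "RF_NeedPostLoad",
--     0x01000000: "RF_HasStack",
--     0x02000000: "RF_Native",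
--     0x04000000: "RF_Marked",
--     0x08000000: "RF_ErrorShutdown",
--     0x10000000: "RF_DebugPostLoad",
--     0x20000000: "RF_DebugSerialize",
--     0x40000000: "RF_DebugDestroy",
--     0x80000000: "RF_DebugDestroy",
-- }
--
-- def analyze_flags(flag_value):
--     """Analyze a flag value and return which flags are set"""
--     if isinstance(flag_value, str):
--         flag_value = int(flag_value, 16)
--
--     set_flags = []
--     for flag_bit, flag_name in sorted(flags_dict.items()):
--         if flag_value & flag_bit:
--             set_flags.append(flag_name)
--
--     return set_flags
-- ===== SOURCE B (Python) =====
-- # Names of the 32 object flags, indexed by bit position (bit 0 first).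
-- FLAG_NAMES = [
--     "RF_Transactional",
--     "RF_Unreachable",
--     "RF_Public",
--     "RF_TagImp",
--     "RF_TagExp",
--     "RF_SourceModified",
--     "RF_TagGarbage",
--     "RF_Final",
--     "RF_PerObjectLocalized",
--     "RF_NeedLoad",
--     "RF_HighlightedName/RF_EliminateObject/RF_RemappedName/RF_Protected",
--     "RF_InSingularFunc/RF_Suppress/RF_StateChanged",
--     "RF_InEndState",
--     "RF_Transient",
--     "RF_Preloading",
--     "RF_LoadForClient",
--     "RF_LoadForServer",
--     "RF_LoadForEdit",
--     "RF_Standalone",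
--     "RF_NotForClient",
--     "RF_NotForServer",
--     "RF_NotForEdit",
--     "RF_Destroyed",
--     "RF_NeedPostLoad",
--     "RF_HasStack",
--     "RF_Native",
--     "RF_Marked",
--     "RF_ErrorShutdown",
--     "RF_DebugPostLoad",
--     "RF_DebugSerialize",
--     "RF_DebugDestroy",
--     "RF_DebugDestroy",
-- ]
--
-- def analyze_flags(flag_value):
--     """Analyze a flag value and return which flags are set"""
--     if isinstance(flag_value, str):
--         flag_value = int(flag_value, 16)
--
--     v = flag_value & 0xFFFFFFFF
--     set_flags = []
--     while v:
--         low = v & -v                 # lowest set bit -> ascending order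
--         set_flags.append(FLAG_NAMES[low.bit_length() - 1])
--         v -= low                     # clear that bit
--     return set_flags
-- ===== Notes on version B (the rewrite author's own statement) =====
-- stated objective: alternative
-- what changed: Instead of A's sorted scan over all 32 dictionary entries, B masks the value to 32 bits and loops only over its set bits, extracting the lowest set bit, indexing a plain name array by the bit's position (bit_length - 1), and clearing the bit by subtraction, yielding the same names in the same ascending order.
import Mathlib
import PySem

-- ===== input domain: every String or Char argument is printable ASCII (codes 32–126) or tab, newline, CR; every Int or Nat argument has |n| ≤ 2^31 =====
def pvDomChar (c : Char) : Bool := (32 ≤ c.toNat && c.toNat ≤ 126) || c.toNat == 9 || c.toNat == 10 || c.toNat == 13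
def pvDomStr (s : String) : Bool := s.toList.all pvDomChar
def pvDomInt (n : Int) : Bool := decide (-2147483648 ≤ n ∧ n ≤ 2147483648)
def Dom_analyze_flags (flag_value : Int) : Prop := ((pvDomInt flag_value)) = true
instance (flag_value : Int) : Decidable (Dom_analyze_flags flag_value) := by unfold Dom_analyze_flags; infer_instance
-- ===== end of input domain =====

-- B replaces A's sort-all-32-dict-entries scan by a lowest-set-bit loop over the 32-bit-masked
-- value: it indexes a plain name table by bit position (via bit_length) and clears the bit by
-- subtraction, visiting only the set bits in ascending order (objective: alternative algorithm).


-- ===== PORT A =====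
-- the module-level flags_dict (insertion order of the Python literal)
def pvFlagPairs : List (Int × String) :=
  [
   (0x00000001, "RF_Transactional"),
   (0x00000002, "RF_Unreachable"),
   (0x00000004, "RF_Public"),
   (0x00000008, "RF_TagImp"),
   (0x00000010, "RF_TagExp"),
   (0x00000020, "RF_SourceModified"),
   (0x00000040, "RF_TagGarbage"),
   (0x00000080, "RF_Final"),
   (0x00000100, "RF_PerObjectLocalized"),
   (0x00000200, "RF_NeedLoad"),
   (0x00000400, "RF_HighlightedName/RF_EliminateObject/RF_RemappedName/RF_Protected"),
   (0x00000800, "RF_InSingularFunc/RF_Suppress/RF_StateChanged"),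
   (0x00001000, "RF_InEndState"),
   (0x00002000, "RF_Transient"),
   (0x00004000, "RF_Preloading"),
   (0x00008000, "RF_LoadForClient"),
   (0x00010000, "RF_LoadForServer"),
   (0x00020000, "RF_LoadForEdit"),
   (0x00040000, "RF_Standalone"),
   (0x00080000, "RF_NotForClient"),
   (0x00100000, "RF_NotForServer"),
   (0x00200000, "RF_NotForEdit"),
   (0x00400000, "RF_Destroyed"),
   (0x00800000, "RF_NeedPostLoad"),
   (0x01000000, "RF_HasStack"),
   (0x02000000, "RF_Native"),
   (0x04000000, "RF_Marked"),
   (0x08000000, "RF_ErrorShutdown"),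
   (0x10000000, "RF_DebugPostLoad"),
   (0x20000000, "RF_DebugSerialize"),
   (0x40000000, "RF_DebugDestroy"),
   (0x80000000, "RF_DebugDestroy")]

def pvFlagsDict : PySem.Dict Int String := PySem.Dict.ofList pvFlagPairs

-- port of A; the int-only signature makes the isinstance(str) branch dead code.
-- sorted(flags_dict.items()): the keys are pairwise distinct, so Python's lexicographic
-- pair order never consults the names and equals sorting by the key component.
def analyze_flags (flag_value : Int) : List String :=
  (PySem.List.sorted pvFlagsDict.items (fun p => p.1) false).foldl
    (fun set_flags p =>
      if PySem.Int.band flag_value p.1 ≠ 0 then set_flags ++ [p.2] else set_flags) []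

-- ===== PORT B =====
-- Source B's FLAG_NAMES: the flag name of bit i at position i
def pvNames : List String :=
  [
   "RF_Transactional",
   "RF_Unreachable",
   "RF_Public",
   "RF_TagImp",
   "RF_TagExp",
   "RF_SourceModified",
   "RF_TagGarbage",
   "RF_Final",
   "RF_PerObjectLocalized",
   "RF_NeedLoad",
   "RF_HighlightedName/RF_EliminateObject/RF_RemappedName/RF_Protected",
   "RF_InSingularFunc/RF_Suppress/RF_StateChanged",
   "RF_InEndState",
   "RF_Transient",
   "RF_Preloading",
   "RF_LoadForClient",
   "RF_LoadForServer",
   "RF_LoadForEdit",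
   "RF_Standalone",
   "RF_NotForClient",
   "RF_NotForServer",
   "RF_NotForEdit",
   "RF_Destroyed",
   "RF_NeedPostLoad",
   "RF_HasStack",
   "RF_Native",
   "RF_Marked",
   "RF_ErrorShutdown",
   "RF_DebugPostLoad",
   "RF_DebugSerialize",
   "RF_DebugDestroy",
   "RF_DebugDestroy"]

-- the while-loop of Source B; fuel 32 bounds the iteration count (the masked value has at most
-- 32 set bits and the loop clears one per step, so the v = 0 test always exits first).
-- FLAG_NAMES[low.bit_length() - 1]: here the index is always in range, so the none branch
-- of pyGet? (Python's IndexError) is unreachable and left as the identity.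
def pvLoopB : Nat → Int → List String → List String
  | 0, _, set_flags => set_flags
  | fuel + 1, v, set_flags =>
    if v = 0 then set_flags
    else
      let low := PySem.Int.band v (-v)
      let set_flags' :=
        match PySem.List.pyGet? pvNames ((PySem.Int.bitLength low : Int) - 1) with
        | some name => set_flags ++ [name]
        | none => set_flags
      pvLoopB fuel (v - low) set_flags'

def analyze_flags_alt (flag_value : Int) : List String :=
  pvLoopB 32 (PySem.Int.band flag_value 0xFFFFFFFF) []

-- ===== PRECONDITION & SPEC =====
def Spec_analyze_flags (flag_value : Int) (out : List String) : Prop := out = analyze_flags_alt flag_value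
instance (flag_value : Int) (out : List String) : Decidable (Spec_analyze_flags flag_value out) := by unfold Spec_analyze_flags; infer_instance

-- ===== CLAIM (what is proved, stated in full; the proofs are below) =====
def Claim_equal_analyze_flags : Prop := ∀ (flag_value : Int), Dom_analyze_flags flag_value → Spec_analyze_flags flag_value (analyze_flags flag_value)

-- ===== LEMMAS AND PROOFS =====

-- the flag name attached to bit i
def pvName (i : Nat) : String := pvNames.getD i ""

-- the reference value: names of the set bits of the 32-bit value m, ascending
def pvF (m : Nat) : List String :=
  ((List.range 32).filter (fun i => m.testBit i)).map pvName

theorem pvPairs_eq_map :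
    pvFlagPairs = (List.range 32).map (fun i => (((2 ^ i : Nat) : Int), pvName i)) := by
  decide

theorem pvSorted_eq : PySem.List.sorted pvFlagsDict.items (fun p => p.1) false = pvFlagPairs := by
  decide

theorem pvGet_names (k : Nat) (hk : k < 32) :
    PySem.List.pyGet? pvNames ((k : Nat) : Int) = some (pvName k) := by
  interval_cases k <;> decide

theorem pvBitLength_two_pow (k : Nat) :
    PySem.Int.bitLength (((2 ^ k : Nat) : Int)) = k + 1 := by
  induction k with
  | zero => decide
  | succ k ih =>
      rw [PySem.Int.bitLength_natCast (m := 2 ^ (k + 1)) (by positivity)]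
      have h : (2 : Nat) ^ (k + 1) / 2 = 2 ^ k := by
        rw [Nat.pow_succ, Nat.mul_div_cancel _ (by norm_num)]
      rw [h, ih]

-- PySem.Int.band of a nonnegative value with a negative one, unfolded
theorem pvBand_negSucc (a n : Nat) :
    PySem.Int.band (Int.negSucc a) (n : Int) = ((n - (n &&& a) : Nat) : Int) := by
  have h1 : ¬ (0 ≤ (Int.negSucc a)) := by omega
  simp [PySem.Int.band, h1]

theorem pvBand_neg_self (m : Nat) (hm : 0 < m) :
    PySem.Int.band (m : Int) (-(m : Int)) = ((m - (m &&& (m - 1)) : Nat) : Int) := by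
  have h1 : (0 : Int) ≤ (m : Int) := by omega
  simp [PySem.Int.band, h1]
  intro h; omega

theorem pvMask_lt (v : Int) : (PySem.Int.band v 0xFFFFFFFF).toNat < 2 ^ 32 := by
  cases v with
  | ofNat a =>
      have h : PySem.Int.band (Int.ofNat a) 0xFFFFFFFF = ((a &&& (2 ^ 32 - 1) : Nat) : Int) :=
        PySem.Int.band_natCast a (2 ^ 32 - 1)
      rw [h, Nat.and_two_pow_sub_one_eq_mod, Int.toNat_natCast]
      omega
  | negSucc a =>
      have h : PySem.Int.band (Int.negSucc a) 0xFFFFFFFF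
          = (((2 ^ 32 - 1) - ((2 ^ 32 - 1) &&& a) : Nat) : Int) :=
        pvBand_negSucc a (2 ^ 32 - 1)
      rw [h, Int.toNat_natCast]
      omega

-- the per-entry test of A is the corresponding bit of the masked value
theorem pvBit (v : Int) (i : Nat) (hi : i < 32) :
    (PySem.Int.band v ((2 ^ i : Nat) : Int) ≠ 0) ↔
      ((PySem.Int.band v 0xFFFFFFFF).toNat.testBit i = true) := by
  cases v with
  | ofNat a =>
      have h1 : PySem.Int.band (Int.ofNat a) ((2 ^ i : Nat) : Int) = ((a &&& 2 ^ i : Nat) : Int) :=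
        PySem.Int.band_natCast a (2 ^ i)
      have h2 : PySem.Int.band (Int.ofNat a) 0xFFFFFFFF = ((a &&& (2 ^ 32 - 1) : Nat) : Int) :=
        PySem.Int.band_natCast a (2 ^ 32 - 1)
      rw [h1, h2, Nat.and_two_pow_sub_one_eq_mod, Int.toNat_natCast, Nat.and_two_pow,
        Nat.testBit_mod_two_pow]
      cases h : a.testBit i
      · simp
      · simp [hi]
  | negSucc a =>
      have h1 : PySem.Int.band (Int.negSucc a) ((2 ^ i : Nat) : Int)
          = ((2 ^ i - (2 ^ i &&& a) : Nat) : Int) := pvBand_negSucc a (2 ^ i)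
      have h2 : PySem.Int.band (Int.negSucc a) 0xFFFFFFFF
          = (((2 ^ 32 - 1) - ((2 ^ 32 - 1) &&& a) : Nat) : Int) := pvBand_negSucc a (2 ^ 32 - 1)
      have hsub : ((2 : Nat) ^ 32 - 1) - ((2 ^ 32 - 1) &&& a) = 2 ^ 32 - (a % 2 ^ 32 + 1) := by
        rw [Nat.land_comm, Nat.and_two_pow_sub_one_eq_mod]
        omega
      rw [h1, h2, hsub, Int.toNat_natCast,
        Nat.testBit_two_pow_sub_succ (Nat.mod_lt _ (by norm_num)),
        Nat.testBit_mod_two_pow, Nat.land_comm, Nat.and_two_pow]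
      cases h : a.testBit i
      · simp [hi]
      · simp

-- 'if cond: out.append(f(x))' folds are filter-then-map (Prop-valued condition)
theorem pvFoldl_append_if {a b : Type} (p : a -> Prop) [DecidablePred p] (f : a -> b)
    (l : List a) (acc : List b) :
    l.foldl (fun acc x => if p x then acc ++ [f x] else acc) acc
      = acc ++ (l.filter (fun x => decide (p x))).map f := by
  induction l generalizing acc with
  | nil => simp
  | cons x xs ih =>
      by_cases h : p x <;> simp [h, ih]

-- A's fold equals the reference on the masked value
theorem pvA_eq_F (v : Int) : analyze_flags v = pvF (PySem.Int.band v 0xFFFFFFFF).toNat := by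
  unfold analyze_flags pvF
  rw [pvSorted_eq, pvFoldl_append_if, List.nil_append, pvPairs_eq_map, List.filter_map,
    List.map_map]
  congr 1
  apply List.filter_congr
  intro i hi
  have hi32 : i < 32 := List.mem_range.mp hi
  simp only [Function.comp]
  rcases pvBit v i hi32 with ⟨h1, h2⟩
  cases h : (PySem.Int.band v 0xFFFFFFFF).toNat.testBit i
  · simp only [decide_eq_false_iff_not]
    intro hc
    exact absurd (h1 hc) (by simp [h])
  · have h3 := h2 h
    push_cast at h3
    simpa using h3

-- the lowest-set-bit decomposition of a nonzero m
theorem pvLowbit (m : Nat) (hm : m ≠ 0) :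
    ∃ k, m.testBit k = true ∧ (∀ j, j < k → m.testBit j = false) ∧
      (m &&& (m - 1)) = m - 2 ^ k ∧ 2 ^ k ≤ m ∧
      (∀ i, (m &&& (m - 1)).testBit i = (m.testBit i && !(decide (i = k)))) := by
  have hex : ∃ i, m.testBit i = true := ⟨m.log2, Nat.testBit_log2 hm⟩
  set k := Nat.find hex with hkdef
  have hk : m.testBit k = true := Nat.find_spec hex
  have hmin : ∀ j, j < k → m.testBit j = false := by
    intro j hj
    simpa using Nat.find_min hex hj
  have hmod : m % 2 ^ k = 0 := by
    apply Nat.eq_of_testBit_eq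
    intro i
    rw [Nat.testBit_mod_two_pow, Nat.zero_testBit]
    by_cases h : i < k
    · simp [h, hmin i h]
    · simp [h]
  have hodd : (m / 2 ^ k) % 2 = 1 := by
    have h := hk
    rw [Nat.testBit_eq_decide_div_mod_eq] at h
    simpa using h
  set q := m / 2 ^ (k + 1) with hq
  have hdecomp : m = 2 ^ (k + 1) * q + 2 ^ k := by
    have h1 := Nat.div_add_mod m (2 ^ k)
    have hdd : m / 2 ^ k / 2 = m / 2 ^ (k + 1) := by
      rw [Nat.div_div_eq_div_mul, ← Nat.pow_succ]
    have h2 := Nat.div_add_mod (m / 2 ^ k) 2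
    rw [hdd] at h2
    have h3 : m / 2 ^ k = 2 * q + 1 := by omega
    calc m = 2 ^ k * (m / 2 ^ k) + m % 2 ^ k := h1.symm
      _ = 2 ^ k * (2 * q + 1) + 0 := by rw [h3, hmod]
      _ = 2 ^ (k + 1) * q + 2 ^ k := by rw [Nat.pow_succ]; ring
  have hpow_pos : 0 < (2 : Nat) ^ k := Nat.two_pow_pos k
  have hm1 : m - 1 = 2 ^ (k + 1) * q + (2 ^ k - 1) := by omega
  have hb1 : (2 : Nat) ^ k < 2 ^ (k + 1) := Nat.pow_lt_pow_right (by norm_num) (by omega)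
  have hbits_m : ∀ i, m.testBit i
      = (if i < k + 1 then decide (k = i) else q.testBit (i - (k + 1))) := by
    intro i
    rw [hdecomp, Nat.testBit_two_pow_mul_add _ hb1]
    by_cases h : i < k + 1 <;> simp [h, Nat.testBit_two_pow]
  have hbits_m1 : ∀ i, (m - 1).testBit i
      = (if i < k + 1 then decide (i < k) else q.testBit (i - (k + 1))) := by
    intro i
    rw [hm1, Nat.testBit_two_pow_mul_add _ (by omega)]
    by_cases h : i < k + 1 <;> simp [h, Nat.testBit_two_pow_sub_one]
  have hland : ∀ i, (m &&& (m - 1)).testBit i = (m.testBit i && !(decide (i = k))) := by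
    intro i
    rw [Nat.testBit_and, hbits_m, hbits_m1]
    by_cases h : i < k + 1
    · by_cases h2 : i = k <;> simp [h, h2] <;> omega
    · have hne : i ≠ k := by omega
      simp [h, hne]
  have hland_val : m &&& (m - 1) = 2 ^ (k + 1) * q := by
    apply Nat.eq_of_testBit_eq
    intro i
    rw [hland, hbits_m]
    have hz : (2 : Nat) ^ (k + 1) * q = 2 ^ (k + 1) * q + 0 := by omega
    rw [hz, Nat.testBit_two_pow_mul_add _ (by omega)]
    by_cases h : i < k + 1
    · by_cases h2 : i = k <;> simp [h, h2, Nat.zero_testBit] <;> omega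
    · have hne : i ≠ k := by omega
      simp [h, hne]
  exact ⟨k, hk, hmin, by omega, by omega, hland⟩

-- one step of the reference: peel the lowest set bit
theorem pvF_step (m mm k : Nat) (hk : k < 32) (hbit : m.testBit k = true)
    (hmin : ∀ j, j < k → m.testBit j = false)
    (hland : ∀ i, mm.testBit i = (m.testBit i && !(decide (i = k)))) :
    pvF m = pvName k :: pvF mm := by
  unfold pvF
  have hsplit : List.range 32 = List.range' 0 k ++ (k :: List.range' (k + 1) (31 - k)) := by
    have h := List.range'_append (s := 0) (m := k) (n := 32 - k) (step := 1)
    simp only [Nat.zero_add, Nat.one_mul] at h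
    rw [List.range_eq_range', ← show k + (32 - k) = 32 by omega, ← h,
      show (32 : Nat) - k = (31 - k) + 1 by omega, List.range'_succ]
  rw [hsplit]
  simp only [List.filter_append, List.filter_cons, List.map_append]
  have hlow : ∀ mmm : Nat, (∀ j, j < k → mmm.testBit j = false) →
      (List.range' 0 k).filter (fun i => mmm.testBit i) = [] := by
    intro mmm hj
    rw [List.filter_eq_nil_iff]
    intro i hi
    have : i < k := by
      have := List.mem_range'_1.mp hi
      omega
    simp [hj i this]
  have hminm : ∀ j, j < k → mm.testBit j = false := by
    intro j hj
    rw [hland j, hmin j hj]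
    simp
  rw [hlow m hmin, hlow mm hminm, hbit, hland k, hbit]
  simp only [decide_true, Bool.not_true, Bool.and_false, if_true, Bool.false_eq_true, if_false,
    List.map_nil, List.nil_append, List.map_cons]
  congr 2
  apply List.filter_congr
  intro i hi
  have : k + 1 ≤ i := by
    have := List.mem_range'_1.mp hi
    omega
  rw [hland i]
  have hne : i ≠ k := by omega
  simp [hne]

-- the loop computes the reference
theorem pvLoop_eq (fuel : Nat) : ∀ (m : Nat) (names : List String),
    (∀ i, m.testBit i = true → 32 - fuel ≤ i ∧ i < 32) →
    pvLoopB fuel (m : Int) names = names ++ pvF m := by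
  induction fuel with
  | zero =>
      intro m names hbits
      have hm0 : m = 0 := by
        apply Nat.eq_of_testBit_eq
        intro i
        rw [Nat.zero_testBit]
        by_contra h
        have hi := hbits i (by simpa using h)
        omega
      subst hm0
      simp [pvLoopB, pvF, Nat.zero_testBit]
  | succ fuel ih =>
      intro m names hbits
      by_cases hm : m = 0
      · subst hm
        simp [pvLoopB, pvF, Nat.zero_testBit]
      · obtain ⟨k, hk, hmin, hval, hle, hland⟩ := pvLowbit m hm
        have hk32 : k < 32 := (hbits k hk).2
        have hne : ((m : Int) ≠ 0) := by
          simpa using hm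
        have hbit2 : m - (m &&& (m - 1)) = 2 ^ k := by
          have hp : 0 < 2 ^ k := Nat.two_pow_pos k
          rw [hval]
          omega
        have hlow : PySem.Int.band (m : Int) (-(m : Int)) = ((2 ^ k : Nat) : Int) := by
          rw [pvBand_neg_self m (by omega), hbit2]
        have hidx : ((PySem.Int.bitLength (((2 ^ k : Nat) : Int)) : Int) - 1) = ((k : Nat) : Int) := by
          rw [pvBitLength_two_pow]
          push_cast
          ring
        have hsub : (m : Int) - ((2 ^ k : Nat) : Int) = ((m &&& (m - 1) : Nat) : Int) := by
          rw [hval]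
          push_cast [hle]
          ring
        rw [pvLoopB, if_neg hne]
        simp only [hlow, hidx, pvGet_names k hk32, hsub]
        rw [ih (m &&& (m - 1)) (names ++ [pvName k]) ?_,
          pvF_step m (m &&& (m - 1)) k hk32 hk hmin hland]
        · simp
        · intro i hi
          rw [hland i] at hi
          have h1 : m.testBit i = true := by
            cases h : m.testBit i
            · rw [h] at hi; simp at hi
            · rfl
          have h2 : i ≠ k := by
            by_contra h
            subst h
            simp at hi
          have h3 : ¬ (i < k) := by
            intro h
            rw [hmin i h] at h1
            exact Bool.false_ne_true h1
          have h4 := hbits k hk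
          exact ⟨by omega, (hbits i h1).2⟩

-- ===== VERDICT (by name: the statement is the Claim_ definition above) =====
theorem analyze_flags_spec : Claim_equal_analyze_flags := by
  intro v _
  unfold Spec_analyze_flags analyze_flags_alt
  have hlt := pvMask_lt v
  have h0 : 0 ≤ PySem.Int.band v 0xFFFFFFFF := by
    have := PySem.Int.band_nonneg_of_nonneg_left (a := (0xFFFFFFFF : Int)) v (by norm_num)
    rw [PySem.Int.band_comm] at this; exact this
  have hb : ∀ i, (PySem.Int.band v 0xFFFFFFFF).toNat.testBit i = true → 32 - 32 ≤ i ∧ i < 32 := by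
    intro i hi
    refine ⟨Nat.zero_le _, ?_⟩
    by_contra h
    rw [Nat.testBit_lt_two_pow
      (lt_of_lt_of_le hlt (Nat.pow_le_pow_right (by norm_num) (by omega)))] at hi
    exact Bool.false_ne_true hi
  have hloop := pvLoop_eq 32 (PySem.Int.band v 0xFFFFFFFF).toNat [] hb
  rw [Int.toNat_of_nonneg h0] at hloop
  rw [pvA_eq_F, hloop, List.nil_append]
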